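-- pv_equiv track=rewrite | github.com/MarcinCichy/auto_net_diagram_creator | main_app.py | find_device_in_list
-- ===== SOURCE A (Python) =====
-- def find_device_in_list(identifier, all_devices_list):
--     """Wyszukuje urządzenie w liście z API po IP lub hostname (ignorując wielkość liter)."""
--     if not identifier or not all_devices_list: return None
--     # Najpierw szukaj po dokładnym IP
--     for d in all_devices_list:
--         if d.get("ip") == identifier: return d
--     # Potem po hostname/sysName (case-insensitive)
--     if isinstance(identifier, str):
--         identifier_lower = identifier.lower()
--         for d in all_devices_list:
--             hostname_api = d.get("hostname")
--             if hostname_api and hostname_api.lower() == identifier_lower: return d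
--         # Dodano fallback na sysName
--         for d in all_devices_list:
--             sysname_api = d.get("sysName")
--             if sysname_api and sysname_api.lower() == identifier_lower: return d
--     return None
-- ===== SOURCE B (Python) =====
-- def find_device_in_list(identifier, all_devices_list):
--     """Single pass over the list keeping first-match slots for ip/hostname/sysName."""
--     if not identifier or not all_devices_list: return None
--     ip_match = host_match = sys_match = None
--     identifier_lower = identifier.lower() if isinstance(identifier, str) else None
--     for d in all_devices_list:
--         if ip_match is None and d.get("ip") == identifier:
--             ip_match = d
--         if identifier_lower is not None:
--             if host_match is None:
--                 h = d.get("hostname")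
--                 if h and h.lower() == identifier_lower:
--                     host_match = d
--             if sys_match is None:
--                 s = d.get("sysName")
--                 if s and s.lower() == identifier_lower:
--                     sys_match = d
--     if ip_match is not None: return ip_match
--     if host_match is not None: return host_match
--     if sys_match is not None: return sys_match
--     return None
-- ===== Notes on version B (the rewrite author's own statement) =====
-- stated objective: alternative
-- what changed: Replaced A's three sequential scans of the list with one pass that keeps first-match slots for ip/hostname/sysName and resolves the ip>hostname>sysName priority after the loop.
import Mathlib
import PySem

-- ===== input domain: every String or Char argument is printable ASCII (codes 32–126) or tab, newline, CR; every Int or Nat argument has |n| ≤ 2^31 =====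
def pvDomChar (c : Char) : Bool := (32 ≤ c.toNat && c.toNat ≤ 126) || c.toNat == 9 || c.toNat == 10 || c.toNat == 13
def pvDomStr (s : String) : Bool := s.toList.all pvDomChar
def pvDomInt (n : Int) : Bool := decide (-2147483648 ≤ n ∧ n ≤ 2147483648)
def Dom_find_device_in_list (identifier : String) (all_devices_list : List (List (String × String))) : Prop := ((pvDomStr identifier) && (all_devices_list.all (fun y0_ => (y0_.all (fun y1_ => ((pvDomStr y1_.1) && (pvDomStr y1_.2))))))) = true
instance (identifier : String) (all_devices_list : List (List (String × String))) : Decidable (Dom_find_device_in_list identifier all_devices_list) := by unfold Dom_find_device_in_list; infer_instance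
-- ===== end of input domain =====

-- B replaces A's three sequential scans by ONE pass keeping first-match slots per key,
-- resolving the ip > hostname > sysName priority after the loop (alternative decomposition).

-- ===== PORT A =====
-- shared match predicates (exact: Python `d.get("ip") == identifier` with a non-empty string
-- identifier; `h and h.lower() == il` — truthiness of a string is `h ≠ ""`)
-- first-match association-list lookup = Python dict .get on the assoc-list encoding
def pvGet (d : List (String × String)) (k : String) : Option String :=
  (d.find? (fun kv => kv.1 == k)).map (·.2)
def pvIpHit (identifier : String) (d : List (String × String)) : Bool :=
  pvGet d "ip" == some identifier
def pvHostHit (il : String) (d : List (String × String)) : Bool :=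
  match pvGet d "hostname" with
  | some h => !(h == "") && (PySem.Str.lower h == il)
  | none => false
def pvSysHit (il : String) (d : List (String × String)) : Bool :=
  match pvGet d "sysName" with
  | some s => !(s == "") && (PySem.Str.lower s == il)
  | none => false

def find_device_in_list (identifier : String) (all_devices_list : List (List (String × String))) : Option (List (String × String)) :=
  if identifier = "" ∨ all_devices_list = [] then none
  else
    match all_devices_list.find? (pvIpHit identifier) with
    | some d => some d
    | none =>
      let identifier_lower := PySem.Str.lower identifier
      match all_devices_list.find? (pvHostHit identifier_lower) with
      | some d => some d
      | none =>
        match all_devices_list.find? (pvSysHit identifier_lower) with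
        | some d => some d
        | none => none

-- ===== PORT B =====
-- a first-match slot: assigned only while still empty
def pvSlot (p : List (String × String) → Bool) (o : Option (List (String × String))) (d : List (String × String)) : Option (List (String × String)) :=
  match o with
  | some x => some x
  | none => if p d then some d else none

def find_device_in_list_alt (identifier : String) (all_devices_list : List (List (String × String))) : Option (List (String × String)) :=
  if identifier = "" ∨ all_devices_list = [] then none
  else
    let il := PySem.Str.lower identifier
    let st := all_devices_list.foldl
      (fun (st : Option (List (String × String)) × Option (List (String × String)) × Option (List (String × String))) d =>
        (pvSlot (pvIpHit identifier) st.1 d, pvSlot (pvHostHit il) st.2.1 d, pvSlot (pvSysHit il) st.2.2 d))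
      (none, none, none)
    match st.1 with
    | some d => some d
    | none =>
      match st.2.1 with
      | some d => some d
      | none =>
        match st.2.2 with
        | some d => some d
        | none => none

-- ===== PRECONDITION & SPEC =====
def Spec_find_device_in_list (identifier : String) (all_devices_list : List (List (String × String))) (out : Option (List (String × String))) : Prop := out = find_device_in_list_alt identifier all_devices_list
instance (identifier : String) (all_devices_list : List (List (String × String))) (out : Option (List (String × String))) : Decidable (Spec_find_device_in_list identifier all_devices_list out) := by unfold Spec_find_device_in_list; infer_instance

-- ===== CLAIM (what is proved, stated in full; the proofs are below) =====
def Claim_equal_find_device_in_list : Prop := ∀ (identifier : String) (all_devices_list : List (List (String × String))), Dom_find_device_in_list identifier all_devices_list → Spec_find_device_in_list identifier all_devices_list (find_device_in_list identifier all_devices_list)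

-- ===== LEMMAS AND PROOFS =====

-- folding one slot over the list is `find?` (first match), from any initial slot
theorem foldl_pvSlot (p : List (String × String) → Bool) (l : List (List (String × String))) (o : Option (List (String × String))) :
    l.foldl (pvSlot p) o = (match o with | some x => some x | none => l.find? p) := by
  induction l generalizing o with
  | nil => cases o <;> simp [List.find?]
  | cons d t ih =>
    cases o with
    | some x => simp [List.foldl, pvSlot, ih]
    | none =>
      simp only [List.foldl, pvSlot]
      cases hp : p d with
      | true => simp [ih, List.find?, hp]
      | false => simp [ih, List.find?, hp]

-- the triple fold splits into three independent slot folds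
theorem foldl_triple (p q r : List (String × String) → Bool) (l : List (List (String × String)))
    (a b c : Option (List (String × String))) :
    l.foldl (fun st d => (pvSlot p st.1 d, pvSlot q st.2.1 d, pvSlot r st.2.2 d)) (a, b, c)
      = (l.foldl (pvSlot p) a, l.foldl (pvSlot q) b, l.foldl (pvSlot r) c) := by
  induction l generalizing a b c with
  | nil => rfl
  | cons d t ih => simp [List.foldl, ih]

-- ===== VERDICT (by name: the statement is the Claim_ definition above) =====
theorem find_device_in_list_spec : Claim_equal_find_device_in_list := by
  intro identifier l _
  unfold Spec_find_device_in_list find_device_in_list find_device_in_list_alt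
  by_cases hg : identifier = "" ∨ l = []
  · simp [hg]
  · simp only [hg, if_false]
    rw [foldl_triple, foldl_pvSlot, foldl_pvSlot, foldl_pvSlot]
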